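-- pv_equiv track=rewrite | github.com/dufufeisdu/AI_Trading_Learn_Packages | learn/Leecode_py/search/word_path.py | create_adj_matirx
-- ===== SOURCE A (Python) =====
-- def distance(w1, w2):
--     not_same = 0
--     for i in range(len(w1)):
--         if w1[i] != w2[i]:
--             not_same += 1
--     return not_same
--
-- def create_adj_matirx(word_dic):
--     adj_matrix = []
--     for word1 in word_dic:
--         line_vec = []
--         for word2 in word_dic:
--             item = [int(distance(word1, word2) == 1), -1]
--             line_vec.append(item)
--         adj_matrix.append(line_vec)
--     return adj_matrix
-- ===== SOURCE B (Python) =====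
-- def create_adj_matirx(word_dic):
--     # Wildcard-pattern bucketing. All words of a word-ladder dictionary share
--     # one length L: file each word, for every position p, under the pattern
--     # (w[:p], w[p+1:]) together with its wildcarded character w[p].  Two words
--     # are at Hamming distance exactly 1 iff they meet in some bucket with
--     # different wildcard characters.
--     L = max(map(len, word_dic), default=0)
--     buckets = {}
--     for i, w in enumerate(word_dic):
--         for p in range(L):
--             buckets.setdefault((w[:p], w[p + 1:]), []).append((i, w[p]))
--     pairs = set()
--     for group in buckets.values():
--         for i, ci in group:
--             for j, cj in group:
--                 if ci != cj:
--                     pairs.add((i, j))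
--     return [[[int((i, j) in pairs), -1] for j, _ in enumerate(word_dic)]
--             for i, _ in enumerate(word_dic)]
-- ===== Notes on version B (the rewrite author's own statement) =====
-- stated objective: alternative
-- what changed: Replaces the per-pair character-counting distance scan with wildcard-pattern bucketing: every word is filed, for each position p, under (w[:p], w[p+1:]) with its wildcard character w[p]; the distance-1 pairs are read off the buckets and the matrix is filled by set membership.
import Mathlib
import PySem

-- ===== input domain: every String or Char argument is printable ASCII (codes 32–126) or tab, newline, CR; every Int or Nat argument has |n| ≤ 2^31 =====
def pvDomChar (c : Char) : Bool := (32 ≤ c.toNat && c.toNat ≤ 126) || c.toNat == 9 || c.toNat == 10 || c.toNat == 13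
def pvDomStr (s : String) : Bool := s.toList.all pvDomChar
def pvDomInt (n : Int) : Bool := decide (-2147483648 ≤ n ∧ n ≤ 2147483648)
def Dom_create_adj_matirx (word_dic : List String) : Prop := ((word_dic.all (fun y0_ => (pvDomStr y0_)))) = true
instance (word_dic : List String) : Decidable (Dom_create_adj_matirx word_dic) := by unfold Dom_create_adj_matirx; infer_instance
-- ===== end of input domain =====

-- B finds the distance-1 pairs by wildcard-pattern bucketing instead of A's per-pair character
-- counting (an alternative algorithm; the n-by-n output matrix keeps both quadratic in n).

-- ===== PORT A =====
def pvDistance (w1 w2 : String) : Int :=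
  (PySem.List.pyRange 0 (PySem.Str.len w1)).foldl
    (fun not_same i =>
      if PySem.List.pyGet? w1.toList i ≠ PySem.List.pyGet? w2.toList i then not_same + 1 else not_same)
    0

def create_adj_matirx (word_dic : List String) : List (List (List Int)) :=
  word_dic.foldl
    (fun adj_matrix word1 =>
      adj_matrix ++ [word_dic.foldl
        (fun line_vec word2 =>
          line_vec ++ [[if pvDistance word1 word2 = 1 then 1 else 0, -1]])
        []])
    []

-- ===== PORT B =====
-- pattern p of w = (w[:p], w[p+1:])
def pvPattern (w : List Char) (p : Int) : List Char × List Char :=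
  (PySem.List.slice w none (some p), PySem.List.slice w (some (p + 1)) none)

-- w[p]; Python raises IndexError out of range — such inputs lie outside Pre_ below
def pvChar (w : String) (p : Int) : Char :=
  (PySem.List.pyGet? w.toList p).getD ' '

-- L = max(map(len, word_dic), default=0)
def pvMaxLen (word_dic : List String) : Int :=
  PySem.List.maxD (word_dic.map PySem.Str.len) id 0

def pvBuckets (word_dic : List String) : PySem.Dict (List Char × List Char) (List (Int × Char)) :=
  (PySem.List.enumerate word_dic).foldl
    (fun buckets iw =>
      (PySem.List.pyRange 0 (pvMaxLen word_dic)).foldl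
        (fun buckets p => buckets.modify (pvPattern iw.2.toList p) [] (· ++ [(iw.1, pvChar iw.2 p)]))
        buckets)
    PySem.Dict.empty

def pvPairs (word_dic : List String) : PySem.Set (Int × Int) :=
  (pvBuckets word_dic).values.foldl
    (fun pairs group =>
      group.foldl
        (fun pairs ic =>
          group.foldl
            (fun pairs jc => if ic.2 ≠ jc.2 then pairs.add (ic.1, jc.1) else pairs)
            pairs)
        pairs)
    PySem.Set.empty

def create_adj_matirx_alt (word_dic : List String) : List (List (List Int)) :=
  let pairs := pvPairs word_dic
  (PySem.List.enumerate word_dic).map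
    (fun iw =>
      (PySem.List.enumerate word_dic).map
        (fun jw => [if (iw.1, jw.1) ∈ pairs then 1 else 0, -1]))

-- ===== PRECONDITION & SPEC =====
-- A's `distance` indexes the second word at every position of the first, so A raises IndexError as
-- soon as the list contains two words of different lengths: Pre_ is exactly A's non-raising domain.
def Pre_create_adj_matirx (word_dic : List String) : Prop :=
  ∀ w1 ∈ word_dic, ∀ w2 ∈ word_dic, w1.toList.length = w2.toList.length
instance (word_dic : List String) : Decidable (Pre_create_adj_matirx word_dic) := by
  unfold Pre_create_adj_matirx; infer_instance

def pvWitness_create_adj_matirx : List String := ["hot", "dot", "dog", "lot"]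

def Spec_create_adj_matirx (word_dic : List String) (out : List (List (List Int))) : Prop :=
  out = create_adj_matirx_alt word_dic
instance (word_dic : List String) (out : List (List (List Int))) : Decidable (Spec_create_adj_matirx word_dic out) := by
  unfold Spec_create_adj_matirx; infer_instance

-- ===== CLAIM (what is proved, stated in full; the proofs are below) =====
def Claim_equal_create_adj_matirx : Prop := ∀ (word_dic : List String), Dom_create_adj_matirx word_dic → Pre_create_adj_matirx word_dic → Spec_create_adj_matirx word_dic (create_adj_matirx word_dic)


-- ===== LEMMAS AND PROOFS =====

-- flattened (pattern, (index, wildcard char)) stream that pvBuckets files into the dict (proof-only helper)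
def pvFlat (word_dic : List String) : List ((List Char × List Char) × (Int × Char)) :=
  (PySem.List.enumerate word_dic).flatMap
    (fun iw => (PySem.List.pyRange 0 (pvMaxLen word_dic)).map
      (fun p => (pvPattern iw.2.toList p, (iw.1, pvChar iw.2 p))))

theorem pvBuckets_eq_flat (wd : List String) :
    pvBuckets wd = (pvFlat wd).foldl (fun d pr => d.modify pr.1 [] (· ++ [pr.2])) PySem.Dict.empty := by
  rw [pvFlat, pvBuckets, List.foldl_flatMap]
  simp [List.foldl_map]

theorem pvBucket_getD (wd : List String) (c : List Char × List Char) :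
    (pvBuckets wd).getD c [] = ((pvFlat wd).filter (·.1 == c)).map (·.2) := by
  rw [pvBuckets_eq_flat, PySem.Dict.getD_foldl_modify_append, PySem.Dict.getD_empty, List.nil_append]

theorem pvBuckets_keys_nodup (wd : List String) : (pvBuckets wd).keys.Nodup := by
  rw [pvBuckets_eq_flat]
  exact PySem.Dict.nodup_keys_foldl_modify_key (pvFlat wd) Prod.fst [] (fun _ pr => (· ++ [pr.2])) _
    (by rw [PySem.Dict.keys_empty]; exact List.nodup_nil)

theorem pv_mem_keys (wd : List String) (c : List Char × List Char) :
    c ∈ (pvBuckets wd).keys ↔ c ∈ (pvFlat wd).map (·.1) := by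
  rw [pvBuckets_eq_flat]
  rw [PySem.Dict.keys_foldl_modify_key (pvFlat wd) Prod.fst [] (fun _ pr => (· ++ [pr.2]))]
  rw [PySem.Set.mem_update, PySem.Dict.keys_empty]
  simp

theorem pv_mem_bucket (wd : List String) (c : List Char × List Char) (x : Int × Char) :
    x ∈ (pvBuckets wd).getD c [] ↔ (c, x) ∈ pvFlat wd := by
  rw [pvBucket_getD]
  simp only [List.mem_map, List.mem_filter]
  constructor
  · rintro ⟨pr, ⟨hm, hc⟩, hx⟩
    have : pr = (c, x) := by cases pr; simp_all
    rwa [this] at hm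
  · intro h; exact ⟨(c, x), ⟨h, by simp⟩, rfl⟩

theorem pv_mem_foldl_add {α β : Type} [BEq α] [LawfulBEq α] (l : List β) (c : β → Prop)
    [DecidablePred c] (k : β → α) (s : PySem.Set α) (x : α) :
    x ∈ l.foldl (fun s b => if c b then s.add (k b) else s) s ↔ x ∈ s ∨ ∃ b ∈ l, c b ∧ x = k b := by
  induction l generalizing s with
  | nil => simp
  | cons b l ih =>
    simp only [List.foldl_cons, ih, List.mem_cons]
    split_ifs with hc
    · simp only [PySem.Set.mem_add]
      constructor
      · rintro (⟨h | rfl⟩ | ⟨b', hb', hcb', rfl⟩)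
        · exact Or.inl h
        · exact Or.inr ⟨b, Or.inl rfl, hc, rfl⟩
        · exact Or.inr ⟨b', Or.inr hb', hcb', rfl⟩
      · rintro (h | ⟨b', (rfl | hb'), hcb', rfl⟩)
        · exact Or.inl (Or.inl h)
        · exact Or.inl (Or.inr rfl)
        · exact Or.inr ⟨b', hb', hcb', rfl⟩
    · constructor
      · rintro (h | ⟨b', hb', hcb', rfl⟩)
        · exact Or.inl h
        · exact Or.inr ⟨b', Or.inr hb', hcb', rfl⟩
      · rintro (h | ⟨b', (rfl | hb'), hcb', rfl⟩)
        · exact Or.inl h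
        · exact absurd hcb' hc
        · exact Or.inr ⟨b', hb', hcb', rfl⟩

theorem pv_mem_foldl_add2 {α β : Type} [BEq α] [LawfulBEq α] (l g : List β) (P : β → β → Prop)
    [∀ i j, Decidable (P i j)] (k : β → β → α) (s : PySem.Set α) (x : α) :
    x ∈ l.foldl (fun s i => g.foldl (fun s j => if P i j then s.add (k i j) else s) s) s ↔
      x ∈ s ∨ ∃ i ∈ l, ∃ j ∈ g, P i j ∧ x = k i j := by
  induction l generalizing s with
  | nil => simp
  | cons b l ih =>
    simp only [List.foldl_cons, ih, List.mem_cons, pv_mem_foldl_add]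
    constructor
    · rintro (⟨h | ⟨j, hj, hP, rfl⟩⟩ | ⟨i, hi, j, hj, hP, rfl⟩)
      · exact Or.inl h
      · exact Or.inr ⟨b, Or.inl rfl, j, hj, hP, rfl⟩
      · exact Or.inr ⟨i, Or.inr hi, j, hj, hP, rfl⟩
    · rintro (h | ⟨i, (rfl | hi), j, hj, hP, rfl⟩)
      · exact Or.inl (Or.inl h)
      · exact Or.inl (Or.inr ⟨j, hj, hP, rfl⟩)
      · exact Or.inr ⟨i, hi, j, hj, hP, rfl⟩

theorem pv_mem_foldl_add3 {α β : Type} [BEq α] [LawfulBEq α] (vs : List (List β)) (P : β → β → Prop)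
    [∀ i j, Decidable (P i j)] (k : β → β → α) (s : PySem.Set α) (x : α) :
    x ∈ vs.foldl (fun s g => g.foldl (fun s i => g.foldl (fun s j => if P i j then s.add (k i j) else s) s) s) s ↔
      x ∈ s ∨ ∃ g ∈ vs, ∃ i ∈ g, ∃ j ∈ g, P i j ∧ x = k i j := by
  induction vs generalizing s with
  | nil => simp
  | cons g vs ih =>
    simp only [List.foldl_cons, ih, List.mem_cons, pv_mem_foldl_add2]
    constructor
    · rintro (⟨h | h⟩ | ⟨g', hg', h⟩)
      · exact Or.inl h
      · exact Or.inr ⟨g, Or.inl rfl, h⟩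
      · exact Or.inr ⟨g', Or.inr hg', h⟩
    · rintro (h | ⟨g', (rfl | hg'), h⟩)
      · exact Or.inl (Or.inl h)
      · exact Or.inl (Or.inr h)
      · exact Or.inr ⟨g', hg', h⟩

theorem pv_mem_pairs (wd : List String) (x : Int × Int) :
    x ∈ pvPairs wd ↔ ∃ c chi chj, (c, (x.1, chi)) ∈ pvFlat wd ∧ (c, (x.2, chj)) ∈ pvFlat wd ∧
      chi ≠ chj := by
  have h3 := pv_mem_foldl_add3 (α := Int × Int) ((pvBuckets wd).values)
      (fun ic jc : Int × Char => ic.2 ≠ jc.2) (fun ic jc => (ic.1, jc.1)) PySem.Set.empty x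
  rw [pvPairs, h3]
  have hempty : x ∈ (PySem.Set.empty : PySem.Set (Int × Int)) ↔ False := by simp [PySem.Set.empty]
  rw [hempty, false_or]
  have hval := PySem.Dict.values_eq_map_keys (pvBuckets wd) (pvBuckets_keys_nodup wd) []
  constructor
  · rintro ⟨g, hg, ic, hi, jc, hj, hP, rfl⟩
    rw [hval, List.mem_map] at hg
    obtain ⟨c, hck, rfl⟩ := hg
    exact ⟨c, ic.2, jc.2, (pv_mem_bucket wd c ic).mp hi, (pv_mem_bucket wd c jc).mp hj, hP⟩
  · rintro ⟨c, chi, chj, h1, h2, hP⟩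
    have hck : c ∈ (pvBuckets wd).keys := by
      rw [pv_mem_keys, List.mem_map]
      exact ⟨(c, (x.1, chi)), h1, rfl⟩
    refine ⟨(pvBuckets wd).getD c [], ?_, (x.1, chi), ?_, (x.2, chj), ?_, hP, rfl⟩
    · rw [hval, List.mem_map]; exact ⟨c, hck, rfl⟩
    · exact (pv_mem_bucket wd c (x.1, chi)).mpr h1
    · exact (pv_mem_bucket wd c (x.2, chj)).mpr h2

theorem pv_mem_enumerate (wd : List String) (i : Int) (w : String) :
    (i, w) ∈ PySem.List.enumerate wd ↔ ∃ k : Nat, ∃ h : k < wd.length, i = (k : Int) ∧ w = wd[k] := by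
  rw [List.mem_iff_getElem]
  constructor
  · rintro ⟨k, hk, he⟩
    rw [PySem.List.length_enumerate] at hk
    rw [PySem.List.getElem_enumerate] at he
    refine ⟨k, hk, ?_, ?_⟩
    · have := congrArg Prod.fst he; simpa using this.symm
    · have := congrArg Prod.snd he; simpa using this.symm
  · rintro ⟨k, hk, rfl, rfl⟩
    exact ⟨k, by rw [PySem.List.length_enumerate]; exact hk, by rw [PySem.List.getElem_enumerate]; simp⟩

theorem pv_mem_pyRange_len (L : Nat) (p : Int) :
    p ∈ PySem.List.pyRange 0 (L : Int) ↔ ∃ q : Nat, q < L ∧ p = (q : Int) := by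
  rw [PySem.List.pyRange_zero_natCast]
  simp [List.mem_map, eq_comm]

theorem pvChar_eq (w : String) (p : Nat) (hp : p < w.toList.length) :
    pvChar w (p : Int) = w.toList[p] := by
  rw [pvChar, PySem.List.pyGet?_natCast, List.getElem?_eq_getElem hp, Option.getD_some]

-- membership in the flat stream, on an equal-length dictionary
theorem pv_flat_mem_iff (wd : List String) (c : List Char × List Char) (ch : Char) (k : Nat)
    (hk : k < wd.length) (hlen : pvMaxLen wd = (wd[k].toList.length : Int)) :
    (c, ((k : Int), ch)) ∈ pvFlat wd ↔
      ∃ p : Nat, ∃ hp : p < wd[k].toList.length,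
        c = pvPattern wd[k].toList (p : Int) ∧ ch = wd[k].toList[p] := by
  rw [pvFlat, List.mem_flatMap]
  constructor
  · rintro ⟨iw, hiw, hm⟩
    obtain ⟨i, w⟩ := iw
    rw [pv_mem_enumerate] at hiw
    obtain ⟨k', hk', rfl, rfl⟩ := hiw
    rw [List.mem_map] at hm
    obtain ⟨p, hp, he⟩ := hm
    have hkk : k' = k := by
      have := congrArg (fun y => y.2.1) he; simp at this
      exact_mod_cast this
    subst hkk
    rw [hlen, pv_mem_pyRange_len] at hp
    obtain ⟨q, hq, rfl⟩ := hp
    have hq' : q < wd[k'].toList.length := hq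
    refine ⟨q, hq', ?_, ?_⟩
    · have := congrArg Prod.fst he; simpa using this.symm
    · have := congrArg (fun y => y.2.2) he; simp at this
      rw [← this, pvChar_eq _ _ hq']
  · rintro ⟨p, hp, rfl, rfl⟩
    refine ⟨((k : Int), wd[k]), ?_, ?_⟩
    · rw [pv_mem_enumerate]; exact ⟨k, hk, rfl, rfl⟩
    · rw [List.mem_map]
      refine ⟨(p : Int), ?_, ?_⟩
      · rw [hlen, pv_mem_pyRange_len]; exact ⟨p, by omega, rfl⟩
      · rw [pvChar_eq _ _ hp]

theorem pvPattern_natCast (w : List Char) (p : Nat) :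
    pvPattern w (p : Int) = (w.take p, w.drop (p + 1)) := by
  rw [pvPattern, PySem.List.slice_to w (by positivity), PySem.List.slice_from w (by positivity)]
  norm_num

theorem pvPattern_eq_iff (l1 l2 : List Char) (hlen : l1.length = l2.length)
    (p q : Nat) (hp : p < l1.length) (hq : q < l2.length) :
    pvPattern l1 (p : Int) = pvPattern l2 (q : Int) ↔
      p = q ∧ l1.take p = l2.take p ∧ l1.drop (p + 1) = l2.drop (p + 1) := by
  rw [pvPattern_natCast, pvPattern_natCast, Prod.mk.injEq]
  constructor
  · rintro ⟨h1, h2⟩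
    have hpq : p = q := by
      have := congrArg List.length h1
      simp [List.length_take] at this
      omega
    subst hpq
    exact ⟨rfl, h1, h2⟩
  · rintro ⟨rfl, h1, h2⟩
    exact ⟨h1, h2⟩

theorem pvDistance_eq_countP (w1 w2 : String) :
    pvDistance w1 w2 =
      ((List.range w1.toList.length).countP (fun k => decide (w1.toList[k]? ≠ w2.toList[k]?)) : Int) := by
  rw [pvDistance, PySem.Str.len_eq, PySem.List.pyRange_zero_natCast, List.foldl_map]
  rw [show (fun (not_same : Int) (k : Nat) =>
      if PySem.List.pyGet? w1.toList (k : Int) ≠ PySem.List.pyGet? w2.toList (k : Int) then not_same + 1 else not_same)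
    = fun not_same k => if (fun k => decide (w1.toList[k]? ≠ w2.toList[k]?)) k = true then not_same + 1 else not_same by
      funext a k; simp [PySem.List.pyGet?_natCast]]
  rw [PySem.List.foldl_count_if]
  simp

theorem pv_countP_range_eq_zip (l1 l2 : List Char) (h : l1.length = l2.length) :
    (List.range l1.length).countP (fun k => decide (l1[k]? ≠ l2[k]?)) =
      (l1.zip l2).countP (fun pr => decide (pr.1 ≠ pr.2)) := by
  induction l1 generalizing l2 with
  | nil => simp
  | cons a l1 ih =>
    cases l2 with
    | nil => simp at h
    | cons b l2 =>
      have h' : l1.length = l2.length := by simpa using h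
      simp only [List.length_cons, List.range_succ_eq_map, List.countP_cons, List.countP_map,
        List.zip_cons_cons]
      rw [← ih l2 h']
      congr 1
      · simp

theorem pv_countP_zip_zero (l1 l2 : List Char) (h : l1.length = l2.length) :
    (l1.zip l2).countP (fun pr => decide (pr.1 ≠ pr.2)) = 0 ↔ l1 = l2 := by
  induction l1 generalizing l2 with
  | nil => cases l2 <;> simp_all
  | cons a l1 ih =>
    cases l2 with
    | nil => simp at h
    | cons b l2 =>
      have h' : l1.length = l2.length := by simpa using h
      simp only [List.zip_cons_cons, List.countP_cons, Nat.add_eq_zero_iff, List.cons.injEq, ih l2 h']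
      by_cases hab : a = b <;> simp [hab]

theorem pv_countP_zip_one (l1 l2 : List Char) (h : l1.length = l2.length) :
    (l1.zip l2).countP (fun pr => decide (pr.1 ≠ pr.2)) = 1 ↔
      (∃ p < l1.length, l1.take p = l2.take p ∧ l1.drop (p + 1) = l2.drop (p + 1)) ∧ l1 ≠ l2 := by
  induction l1 generalizing l2 with
  | nil => simp
  | cons a l1 ih =>
    cases l2 with
    | nil => simp at h
    | cons b l2 =>
      have h' : l1.length = l2.length := by simpa using h
      by_cases hab : a = b
      · subst hab
        simp only [List.zip_cons_cons, List.countP_cons, ne_eq, not_true_eq_false, decide_false,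
          Bool.false_eq_true, if_false, add_zero, ih l2 h', List.length_cons]
        constructor
        · rintro ⟨⟨p, hp, ht, hd⟩, hne⟩
          refine ⟨⟨p + 1, by omega, ?_, ?_⟩, ?_⟩
          · simp [List.take_succ_cons, ht]
          · simpa using hd
          · simp [hne]
        · rintro ⟨⟨p, hp, ht, hd⟩, hne⟩
          have hne' : l1 ≠ l2 := by simpa using hne
          match p, ht, hd with
          | 0, ht, hd =>
            exact absurd (by simpa using hd) hne'
          | p + 1, ht, hd =>
            refine ⟨⟨p, by omega, ?_, ?_⟩, hne'⟩
            · simpa [List.take_succ_cons] using ht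
            · simpa using hd
      · simp only [List.zip_cons_cons, List.countP_cons, ne_eq, hab, not_false_eq_true,
          decide_true, if_true, List.length_cons]
        rw [show (l1.zip l2).countP (fun pr => decide ¬pr.1 = pr.2) + 1 = 1 ↔
            (l1.zip l2).countP (fun pr => decide ¬pr.1 = pr.2) = 0 by omega]
        have hz := pv_countP_zip_zero l1 l2 h'
        simp only [ne_eq] at hz
        rw [hz]
        constructor
        · rintro rfl
          exact ⟨⟨0, by omega, by simp, by simp⟩, by simp [hab]⟩
        · rintro ⟨⟨p, hp, ht, hd⟩, _⟩
          match p, ht, hd with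
          | 0, ht, hd => simpa using hd
          | p + 1, ht, hd =>
            exfalso
            have := congrArg (fun l => l.head?) ht
            simp [List.take_succ_cons] at this
            exact hab this

-- with the pattern pieces equal at p, the two lists differ iff they differ at p
theorem pv_ne_iff_char_ne (l1 l2 : List Char) (h : l1.length = l2.length)
    (p : Nat) (hp : p < l1.length)
    (ht : l1.take p = l2.take p) (hd : l1.drop (p + 1) = l2.drop (p + 1)) :
    l1 ≠ l2 ↔ l1[p] ≠ l2[p]'(h ▸ hp) := by
  constructor
  · intro hne hc
    apply hne
    have e1 : l1 = l1.take p ++ l1[p] :: l1.drop (p + 1) := by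
      conv_lhs => rw [← List.take_append_drop p l1]
      rw [List.drop_eq_getElem_cons hp]
    have e2 : l2 = l2.take p ++ l2[p]'(h ▸ hp) :: l2.drop (p + 1) := by
      conv_lhs => rw [← List.take_append_drop p l2]
      rw [List.drop_eq_getElem_cons (h ▸ hp)]
    rw [e1, e2, ht, hd, hc]
  · intro hc hne
    subst hne
    exact hc rfl

-- the heart: pair membership coincides with distance-1 on equal-length dictionaries
theorem pv_pointwise (wd : List String) (hpre : Pre_create_adj_matirx wd)
    (ki kj : Nat) (hki : ki < wd.length) (hkj : kj < wd.length) :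
    (((ki : Int), (kj : Int)) ∈ pvPairs wd) ↔ pvDistance wd[ki] wd[kj] = 1 := by
  have hwd : wd.map PySem.Str.len ≠ [] := by
    intro h
    rw [List.map_eq_nil_iff] at h
    subst h; simp at hki
  have hlen : wd[ki].toList.length = wd[kj].toList.length :=
    hpre wd[ki] (List.getElem_mem hki) wd[kj] (List.getElem_mem hkj)
  have hl0i : pvMaxLen wd = (wd[ki].toList.length : Int) := by
    have hmem := PySem.List.maxD_mem (wd.map PySem.Str.len) id 0 hwd
    rw [List.mem_map] at hmem
    obtain ⟨w, hw, he⟩ := hmem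
    have := hpre w hw wd[ki] (List.getElem_mem hki)
    rw [pvMaxLen, ← he, PySem.Str.len_eq, this]
  have hl0j : pvMaxLen wd = (wd[kj].toList.length : Int) := by
    rw [hl0i, hlen]
  rw [pv_mem_pairs]
  rw [pvDistance_eq_countP, pv_countP_range_eq_zip _ _ hlen]
  rw [show (((List.zip wd[ki].toList wd[kj].toList).countP (fun pr => decide (pr.1 ≠ pr.2)) : Nat) : Int) = 1 ↔
      (List.zip wd[ki].toList wd[kj].toList).countP (fun pr => decide (pr.1 ≠ pr.2)) = 1 by exact_mod_cast Iff.rfl]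
  rw [pv_countP_zip_one _ _ hlen]
  constructor
  · rintro ⟨c, chi, chj, h1, h2, hne⟩
    rw [pv_flat_mem_iff wd c chi ki hki hl0i] at h1
    rw [pv_flat_mem_iff wd c chj kj hkj hl0j] at h2
    obtain ⟨p, hp, rfl, rfl⟩ := h1
    obtain ⟨q, hq, he, rfl⟩ := h2
    rw [pvPattern_eq_iff _ _ hlen p q hp hq] at he
    obtain ⟨rfl, ht, hd⟩ := he
    exact ⟨⟨p, hp, ht, hd⟩, (pv_ne_iff_char_ne _ _ hlen p hp ht hd).mpr hne⟩
  · rintro ⟨⟨p, hp, ht, hd⟩, hne⟩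
    refine ⟨pvPattern wd[ki].toList (p : Int), wd[ki].toList[p], wd[kj].toList[p]'(hlen ▸ hp),
      ?_, ?_, (pv_ne_iff_char_ne _ _ hlen p hp ht hd).mp hne⟩
    · rw [pv_flat_mem_iff wd _ _ ki hki hl0i]
      exact ⟨p, hp, rfl, rfl⟩
    · rw [pv_flat_mem_iff wd _ _ kj hkj hl0j]
      exact ⟨p, hlen ▸ hp, by rw [pvPattern_eq_iff _ _ hlen p p hp (hlen ▸ hp)]; exact ⟨rfl, ht, hd⟩, rfl⟩

-- A's append-folds are maps
theorem pv_A_shape (wd : List String) :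
    create_adj_matirx wd =
      wd.map (fun w1 => wd.map (fun w2 => [if pvDistance w1 w2 = 1 then 1 else 0, -1])) := by
  rw [create_adj_matirx]
  simp only [PySem.List.foldl_append_singleton_eq_map, List.nil_append]

-- ===== VERDICT (by name: the statement is the Claim_ definition above) =====
theorem create_adj_matirx_spec : Claim_equal_create_adj_matirx := by
  intro wd _ hpre
  unfold Spec_create_adj_matirx
  rw [pv_A_shape, create_adj_matirx_alt]
  apply List.ext_getElem
  · simp [PySem.List.length_enumerate]
  intro i hi hi'
  simp only [List.getElem_map, PySem.List.getElem_enumerate]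
  apply List.ext_getElem
  · simp [PySem.List.length_enumerate]
  intro j hj hj'
  simp only [List.getElem_map, PySem.List.getElem_enumerate]
  have hi2 : i < wd.length := by simpa [PySem.List.length_enumerate] using hi'
  have hj2 : j < wd.length := by simpa [PySem.List.length_enumerate] using hj'
  have := pv_pointwise wd hpre i j hi2 hj2
  simp only [zero_add]
  rw [show (if pvDistance wd[i] wd[j] = 1 then (1 : Int) else 0) =
      (if ((i : Int), (j : Int)) ∈ pvPairs wd then (1 : Int) else 0) by
    rcases Classical.em (((i : Int), (j : Int)) ∈ pvPairs wd) with hm | hm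
    · rw [if_pos hm, if_pos (this.mp hm |>.symm ▸ (this.mp hm))]
    · rw [if_neg hm, if_neg (fun hd => hm (this.mpr hd))]]
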